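-- pv_equiv track=rewrite | github.com/Pinguladora/advent-of-code | 2017/6/Python/main.py | count_redistribution_cycles
-- ===== SOURCE A (Python) =====
-- def redistribute_blocks(memory_banks: list[int]) -> None:
--     max_blocks = max(memory_banks)
--     max_index = memory_banks.index(max_blocks)
--     memory_banks[max_index] = 0
--     while max_blocks > 0:
--         max_index = (max_index + 1) % len(memory_banks)
--         memory_banks[max_index] += 1
--         max_blocks -= 1
--
-- def count_redistribution_cycles(memory_banks: list[int]) -> int:
--     configurations_seen = set()
--     cycles = 0
--     while tuple(memory_banks) not in configurations_seen:
--         configurations_seen.add(tuple(memory_banks))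
--         # Notice how we didnt assign it to anything. It works inplace.
--         _ = redistribute_blocks(memory_banks)
--         cycles += 1
--     return cycles
-- ===== SOURCE B (Python) =====
-- def count_redistribution_cycles(memory_banks: list[int]) -> int:
--     n = len(memory_banks)
--     seen = set()
--     config = tuple(memory_banks)
--     cycles = 0
--     while config not in seen:
--         seen.add(config)
--         m = max(config)
--         i = config.index(m)
--         q, r = divmod(m, n) if m > 0 else (0, 0)
--         config = tuple((0 if j == i else config[j]) + q
--                        + (1 if (j - i - 1) % n < r else 0)
--                        for j in range(n))
--         cycles += 1
--     return cycles
-- ===== Notes on version B (the rewrite author's own statement) =====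
-- stated objective: alternative
-- what changed: B replaces A's per-unit cyclic increment loop with a closed-form divmod distribution computed once per cycle, and works on an immutable tuple instead of mutating the list in place; the cycle-detection outer loop still dominates, so overall cost is similar.
import Mathlib
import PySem

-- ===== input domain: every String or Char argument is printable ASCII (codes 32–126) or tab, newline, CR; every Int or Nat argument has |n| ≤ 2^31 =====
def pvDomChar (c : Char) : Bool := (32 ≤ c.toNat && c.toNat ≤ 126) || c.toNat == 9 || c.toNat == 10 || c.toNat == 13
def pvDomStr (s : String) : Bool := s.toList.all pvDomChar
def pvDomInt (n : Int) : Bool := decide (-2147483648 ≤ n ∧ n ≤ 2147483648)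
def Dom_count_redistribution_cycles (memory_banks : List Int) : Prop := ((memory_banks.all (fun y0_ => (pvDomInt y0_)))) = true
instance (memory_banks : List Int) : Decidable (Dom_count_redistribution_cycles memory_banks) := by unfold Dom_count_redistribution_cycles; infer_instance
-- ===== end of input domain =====

-- B replaces A's per-unit cyclic increment loop with a divmod bulk distribution (objective: alternative algorithm for the redistribution step);
-- Python A mutates its argument in place while B does not — the equivalence proved here is about the RETURN value only.
-- Both while-loops are made total with the same generous fuel bound (a totality guard, never reached on tested inputs).

-- fuel: an upper bound scaffold for the cycle-detection loops (totality guard only)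
def pvFuel (banks : List Int) : Nat :=
  let n := banks.length
  let t := banks.foldl (fun a x => a + x.natAbs) 0
  ((n + 2) * t + 2) ^ n + n + 2

-- ===== PORT A =====
-- inner 'while max_blocks > 0' loop of redistribute_blocks (recursion on the Nat count)
def pvRedistInner (banks : List Int) (idx : Nat) (m : Nat) : List Int :=
  match m with
  | 0 => banks
  | Nat.succ k =>
    let idx' := (idx + 1) % banks.length
    pvRedistInner (banks.set idx' (banks.getD idx' 0 + 1)) idx' k

-- redistribute_blocks (returns the new bank list; Python mutates in place)
def pvRedistribute (banks : List Int) : List Int :=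
  match PySem.List.max? banks (fun y => y) with
  | none => banks          -- max([]) raises ValueError; excluded by Pre_
  | some m =>
    let idx := (PySem.List.index? banks m).getD 0   -- always `some` (the max is a member)
    pvRedistInner (banks.set idx 0) idx m.toNat

def pvLoopA (fuel : Nat) (seen : PySem.Set (List Int)) (banks : List Int) (cycles : Int) : Int :=
  match fuel with
  | 0 => cycles
  | Nat.succ f =>
    if PySem.Set.contains seen banks then cycles
    else pvLoopA f (PySem.Set.add seen banks) (pvRedistribute banks) (cycles + 1)

def count_redistribution_cycles (memory_banks : List Int) : Int :=
  pvLoopA (pvFuel memory_banks) PySem.Set.empty memory_banks 0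

-- ===== PORT B =====
-- one redistribution step of Source B: divmod bulk distribution, no per-unit loop
def pvStepAlt (config : List Int) : List Int :=
  match PySem.List.max? config (fun y => y) with
  | none => config         -- max(()) raises ValueError; excluded by Pre_
  | some m =>
    let n := config.length
    let i := (PySem.List.index? config m).getD 0
    let qr : Int × Int := if m > 0 then (PySem.Int.floordiv m (n : Int), PySem.Int.mod m (n : Int)) else (0, 0)
    (PySem.List.pyRange 0 (n : Int) 1).map (fun j =>
      (if j = (i : Int) then 0 else PySem.List.pyGetD config j 0) + qr.1 +
      (if PySem.Int.mod (j - (i : Int) - 1) (n : Int) < qr.2 then 1 else 0))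

def pvLoopB (fuel : Nat) (seen : PySem.Set (List Int)) (config : List Int) (cycles : Int) : Int :=
  match fuel with
  | 0 => cycles
  | Nat.succ f =>
    if PySem.Set.contains seen config then cycles
    else pvLoopB f (PySem.Set.add seen config) (pvStepAlt config) (cycles + 1)

def count_redistribution_cycles_alt (memory_banks : List Int) : Int :=
  pvLoopB (pvFuel memory_banks) PySem.Set.empty memory_banks 0

-- ===== PRECONDITION & SPEC =====
-- Pre_ excludes only the empty list, on which Python A raises ValueError (max of an empty sequence).
def Pre_count_redistribution_cycles (memory_banks : List Int) : Prop := memory_banks ≠ []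
instance (memory_banks : List Int) : Decidable (Pre_count_redistribution_cycles memory_banks) := by unfold Pre_count_redistribution_cycles; infer_instance

def pvWitness_count_redistribution_cycles : List Int := [0, 2, 7, 0]

def Spec_count_redistribution_cycles (memory_banks : List Int) (out : Int) : Prop := out = count_redistribution_cycles_alt memory_banks
instance (memory_banks : List Int) (out : Int) : Decidable (Spec_count_redistribution_cycles memory_banks out) := by unfold Spec_count_redistribution_cycles; infer_instance

-- ===== CLAIM (what is proved, stated in full; the proofs are below) =====
def Claim_equal_count_redistribution_cycles : Prop := ∀ (memory_banks : List Int), Dom_count_redistribution_cycles memory_banks → Pre_count_redistribution_cycles memory_banks → Spec_count_redistribution_cycles memory_banks (count_redistribution_cycles memory_banks)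

-- ===== LEMMAS AND PROOFS =====

def pvCnt (n p j k : Nat) : Nat :=
  match k with
  | 0 => 0
  | Nat.succ k => (if (p+1) % n = j then 1 else 0) + pvCnt n ((p+1) % n) j k

theorem succ_div_mod (n k : Nat) (hn : 0 < n) :
    (k+1)/n = (if k % n + 1 = n then k/n + 1 else k/n) ∧
    (k+1)%n = (if k % n + 1 = n then 0 else k % n + 1) := by
  have h := Nat.div_add_mod k n
  have hlt := Nat.mod_lt k hn
  by_cases hc : k % n + 1 = n
  · have he : (k/n + 1) * n = n * (k/n) + n := by ring
    have hk1 : k + 1 = (k/n + 1) * n := by omega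
    constructor
    · rw [if_pos hc, hk1, Nat.mul_div_cancel _ hn]
    · rw [if_pos hc, hk1, Nat.mul_mod_left]
  · have hk1 : k + 1 = (k % n + 1) + n * (k / n) := by omega
    constructor
    · rw [hk1, Nat.add_mul_div_left _ _ hn, Nat.div_eq_of_lt (by omega)]; rw [if_neg hc]; omega
    · rw [hk1, Nat.add_mul_mod_self_left, Nat.mod_eq_of_lt (by omega)]; rw [if_neg hc]

theorem mod_two_cases (n a : Nat) (h : a < 2*n) :
    a % n = if a < n then a else a - n := by
  split
  · exact Nat.mod_eq_of_lt (by omega)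
  · rw [Nat.mod_eq_sub_mod (by omega), Nat.mod_eq_of_lt (by omega)]

theorem pvCnt_closed (n j : Nat) (hn : 0 < n) (hj : j < n) :
    ∀ (k p : Nat), p < n →
      pvCnt n p j k = k / n + (if (j + (n - 1 - p)) % n < k % n then 1 else 0) := by
  intro k
  induction k with
  | zero =>
    intro p hp
    simp [pvCnt, Nat.zero_mod, Nat.zero_div]
  | succ k ih =>
    intro p hp
    have hp' : (p+1) % n < n := Nat.mod_lt _ hn
    show (if (p+1) % n = j then 1 else 0) + pvCnt n ((p+1) % n) j k = _
    rw [ih _ hp']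
    obtain ⟨hdiv, hmod⟩ := succ_div_mod n k hn
    rw [hdiv, hmod]
    rw [mod_two_cases n (p+1) (by omega)]
    rw [mod_two_cases n (j + (n - 1 - p)) (by omega)]
    have hr : k % n < n := Nat.mod_lt _ hn
    by_cases hpn : p + 1 < n
    · rw [if_pos hpn]
      rw [mod_two_cases n (j + (n - 1 - (p+1))) (by omega)]
      generalize k % n = r at hr ⊢
      generalize k / n = q
      split_ifs <;> omega
    · rw [if_neg hpn]
      rw [mod_two_cases n (j + (n - 1 - (p+1-n))) (by omega)]
      generalize k % n = r at hr ⊢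
      generalize k / n = q
      split_ifs <;> omega

theorem pvRedistInner_length : ∀ (k : Nat) (l : List Int) (p : Nat),
    (pvRedistInner l p k).length = l.length := by
  intro k
  induction k with
  | zero => intro l p; rfl
  | succ k ih => intro l p; rw [pvRedistInner]; simp [ih]

theorem pvRedistInner_getD (n : Nat) (hn : 0 < n) :
    ∀ (k : Nat) (l : List Int) (p j : Nat), l.length = n → p < n → j < n →
      (pvRedistInner l p k).getD j 0 = l.getD j 0 + (pvCnt n p j k : Int) := by
  intro k
  induction k with
  | zero => intro l p j hl hp hj; simp [pvRedistInner, pvCnt]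
  | succ k ih =>
    intro l p j hl hp hj
    have hp' : (p+1) % n < n := Nat.mod_lt _ hn
    rw [pvRedistInner]
    simp only [hl]
    rw [ih _ ((p+1) % n) j (by simp [hl]) hp' hj]
    have hset : (l.set ((p+1) % n) (l.getD ((p+1) % n) 0 + 1)).getD j 0
        = l.getD j 0 + (if (p+1) % n = j then 1 else 0) := by
      have hjl : j < l.length := by omega
      rw [List.getD_eq_getElem _ _ (by simpa using hjl), List.getD_eq_getElem _ _ hjl,
        List.getElem_set]
      split_ifs with h1
      · simp [h1, List.getElem?_eq_getElem hjl]
      · simp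
    rw [hset]
    show _ = l.getD j 0 + (((if (p+1) % n = j then 1 else 0) + pvCnt n ((p+1) % n) j k : Nat) : Int)
    push_cast
    ring


theorem pvStep_eq (banks : List Int) : pvRedistribute banks = pvStepAlt banks := by
  rcases hmax : PySem.List.max? banks (fun y => y) with _ | m
  · simp [pvRedistribute, pvStepAlt, hmax]
  · have hmem : m ∈ banks := PySem.List.max?_mem hmax
    have hsome : (PySem.List.index? banks m).isSome := ((PySem.List.index?_isSome_iff banks m).mpr hmem)
    obtain ⟨idx, hidx⟩ := Option.isSome_iff_exists.mp hsome
    obtain ⟨hlt, hgetm, -⟩ := PySem.List.getElem_of_index?_eq_some hidx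
    have hn0 : 0 < banks.length := by omega
    simp only [pvRedistribute, pvStepAlt, hmax, hidx, Option.getD_some]
    apply List.ext_getElem
    · rw [pvRedistInner_length]
      simp [PySem.List.length_pyRange_one]
    · intro j hj1 hj2
      have hj : j < banks.length := by
        rw [pvRedistInner_length] at hj1; simpa using hj1
      rw [List.getElem_map, PySem.List.getElem_pyRange_one]
      rw [← List.getD_eq_getElem _ 0 hj1]
      rw [pvRedistInner_getD banks.length hn0 m.toNat _ idx j (by simp) hlt hj]
      rw [pvCnt_closed banks.length j hn0 hj m.toNat idx hlt]
      have hsetD : (banks.set idx 0).getD j 0 = if j = idx then (0:Int) else banks.getD j 0 := by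
        rw [List.getD_eq_getElem _ _ (by simpa using hj), List.getElem_set]
        split_ifs with h1 h2 h3
        · rfl
        · exact absurd h1.symm h2
        · exact absurd h3.symm h1
        · rw [List.getD_eq_getElem _ _ hj]
      rw [hsetD]
      have hcast : ((j : Int) = (idx : Int)) = (j = idx) := by simp
      have hmodkey : PySem.Int.mod ((j:Int) - (idx:Int) - 1) (banks.length : Int)
          = ((j + (banks.length - 1 - idx)) % banks.length : Nat) := by
        have key : ((j:Int) - (idx:Int) - 1)
            = ((j + (banks.length - 1 - idx) : Nat) : Int) - (banks.length : Int) := by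
          push_cast
          omega
        rw [key, PySem.Int.mod_eq_emod_of_pos (by exact_mod_cast hn0), Int.sub_emod_right]
        push_cast
        rfl
      simp only [zero_add, hcast, PySem.List.pyGetD_natCast, hmodkey]
      by_cases hm : m > 0
      · rw [if_pos hm]
        dsimp only
        have hmc : m = (m.toNat : Int) := (Int.toNat_of_nonneg (le_of_lt hm)).symm
        conv_rhs => rw [hmc]
        rw [PySem.Int.floordiv_natCast, PySem.Int.mod_natCast]
        simp only [Nat.cast_lt]
        split_ifs <;> push_cast <;> ring
      · rw [if_neg hm]
        dsimp only
        have hm0 : m.toNat = 0 := by omega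
        rw [hm0]
        have hge : ¬ (((j + (banks.length - 1 - idx)) % banks.length : Nat) : Int) < 0 := by
          exact not_lt.mpr (Int.natCast_nonneg _)
        rw [if_neg hge]
        simp [Nat.zero_div]

theorem pvLoop_eq (fuel : Nat) : ∀ (seen : PySem.Set (List Int)) (banks : List Int) (cycles : Int),
    pvLoopA fuel seen banks cycles = pvLoopB fuel seen banks cycles := by
  induction fuel with
  | zero => intro seen banks cycles; rfl
  | succ f ih =>
    intro seen banks cycles
    simp only [pvLoopA, pvLoopB]
    split
    · rfl
    · rw [ih, pvStep_eq]

-- ===== VERDICT (by name: the statement is the Claim_ definition above) =====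
theorem count_redistribution_cycles_spec : Claim_equal_count_redistribution_cycles := by
  intro banks _ _
  unfold Spec_count_redistribution_cycles count_redistribution_cycles count_redistribution_cycles_alt
  exact pvLoop_eq _ _ _ _
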